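-- pv_equiv track=rewrite | github.com/jmdeleon1110/DATA120-HW5 | pa5.py | remove_pairs
-- ===== SOURCE A (Python) =====
-- def remove_pairs(directions):
--     turnarounds = {'EW', 'WE', 'NS', 'SN'}
--
--     if len(directions) <= 1:
--         return directions
--
--     pair = directions[:2]
--     if pair in turnarounds:
--         return remove_pairs(directions[2:])
--     else:
--         return directions[0] + remove_pairs(directions[1:])
-- ===== SOURCE B (Python) =====
-- def remove_pairs(directions):
--     turnarounds = {'EW', 'WE', 'NS', 'SN'}
--     out = []
--     pending = None
--     for c in directions:
--         if pending is not None and pending + c in turnarounds: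
--             pending = None
--         else:
--             if pending is not None:
--                 out.append(pending)
--             pending = c
--     if pending is not None:
--         out.append(pending)
--     return ''.join(out)
-- ===== Notes on version B (the rewrite author's own statement) =====
-- stated objective: faster
-- what changed: Replaced the recursive slice-and-concatenate two-character lookahead with a single fold over the characters carrying one pending character as state (Option), emitting or cancelling it as each new character arrives.
import Mathlib
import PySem

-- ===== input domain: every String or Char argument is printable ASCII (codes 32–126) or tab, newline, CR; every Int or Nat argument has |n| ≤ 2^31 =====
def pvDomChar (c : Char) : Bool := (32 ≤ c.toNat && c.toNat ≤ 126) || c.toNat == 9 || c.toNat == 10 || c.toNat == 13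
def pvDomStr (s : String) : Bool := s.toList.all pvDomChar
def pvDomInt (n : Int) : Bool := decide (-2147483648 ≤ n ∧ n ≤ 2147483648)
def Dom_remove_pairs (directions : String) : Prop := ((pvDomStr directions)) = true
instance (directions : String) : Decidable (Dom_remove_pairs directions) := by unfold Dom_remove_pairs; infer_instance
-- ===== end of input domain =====

-- B replaces A's recursive two-character slice-and-concatenate scan with one
-- left fold over single characters carrying a pending character as Option
-- state (objective: faster, A re-slices strings per step).

-- ===== PORT A =====
-- pair ∈ {'EW','WE','NS','SN'} as a check on two characters
def pairIsTurnaround (a b : Char) : Bool :=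
  (a == 'E' && b == 'W') || (a == 'W' && b == 'E') ||
  (a == 'N' && b == 'S') || (a == 'S' && b == 'N')

-- A's recursion: len ≤ 1 → return; leading pair in set → recurse on [2:];
-- else first char ++ recurse on [1:]
def removePairsA : List Char → List Char
  | [] => []
  | [c] => [c]
  | a :: b :: rest =>
      if pairIsTurnaround a b then removePairsA rest
      else a :: removePairsA (b :: rest)
  termination_by l => l.length

def remove_pairs (directions : String) : String :=
  String.ofList (removePairsA directions.toList)

-- ===== PORT B =====
-- B's fold step: state = (output so far, reversed) × pending character.
-- If the pending character and the new one form a turnaround, drop both;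
-- otherwise flush the pending character to the output and hold the new one.
def stepB (st : List Char × Option Char) (c : Char) : List Char × Option Char :=
  match st with
  | (out, some p) => if pairIsTurnaround p c then (out, none) else (p :: out, some c)
  | (out, none) => (out, some c)

-- flush the final pending character and un-reverse the output
def finishB (st : List Char × Option Char) : List Char :=
  match st with
  | (out, some p) => (p :: out).reverse
  | (out, none) => out.reverse

def remove_pairs_alt (directions : String) : String :=
  String.ofList (finishB (directions.toList.foldl stepB ([], none)))

-- ===== PRECONDITION & SPEC =====
def Spec_remove_pairs (directions : String) (out : String) : Prop := out = remove_pairs_alt directions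
instance (directions : String) (out : String) : Decidable (Spec_remove_pairs directions out) := by unfold Spec_remove_pairs; infer_instance

-- ===== CLAIM (what is proved, stated in full; the proofs are below) =====
def Claim_equal_remove_pairs : Prop := ∀ (directions : String), Dom_remove_pairs directions → Spec_remove_pairs directions (remove_pairs directions)

-- ===== LEMMAS AND PROOFS =====

-- fold invariant: starting with no pending character, B's fold computes the
-- accumulator (reversed) followed by A's result on the remaining list
theorem foldB_eq (l : List Char) :
    ∀ acc, finishB (l.foldl stepB (acc, none)) = acc.reverse ++ removePairsA l := by
  induction l using removePairsA.induct with
  | case1 => intro acc; simp [finishB, removePairsA]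
  | case2 c => intro acc; simp [List.foldl, stepB, finishB, removePairsA]
  | case3 a b rest h ih =>
      intro acc
      simp only [List.foldl, stepB, removePairsA, if_pos h, ih]
  | case4 a b rest h ih =>
      intro acc
      have h2 : rest.foldl stepB (a :: acc, some b) =
          (b :: rest).foldl stepB (a :: acc, none) := rfl
      simp only [List.foldl, stepB, removePairsA, if_neg h]
      rw [h2, ih]
      simp

-- ===== VERDICT (by name: the statement is the Claim_ definition above) =====
theorem remove_pairs_spec : Claim_equal_remove_pairs := by
  intro directions _
  unfold Spec_remove_pairs remove_pairs remove_pairs_alt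
  rw [foldB_eq]
  simp
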